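-- pv_equiv track=rewrite | github.com/anmoanmo/acm_exercises | lanqiao/2022A/矩阵拼接.py | check6
-- ===== SOURCE A (Python) =====
-- def check6(a, b, c):
--     for i in a:
--         for j in b:
--             for k in c:
--                 if i == j or i == k or j == k:
--                     return True
--                 if i == j + k or j == i + k or k == i + j:
--                     return True
-- ===== SOURCE B (Python) =====
-- def check6(a, b, c):
--     # One triple (i, j, k) exists iff all three lists are non-empty and one of the
--     # six pairwise relations holds between two of the (deduplicated) lists.
--     if not (a and b and c):
--         return None
--     sa, sb, sc = set(a), set(b), set(c)
--     if any(x in sb or x in sc for x in sa) or any(x in sc for x in sb):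
--         return True
--     if any(j + k in sa for j in sb for k in sc):
--         return True
--     if any(i + k in sb for i in sa for k in sc):
--         return True
--     if any(i + j in sc for i in sa for j in sb):
--         return True
--     return None
-- ===== Notes on version B (the rewrite author's own statement) =====
-- stated objective: alternative
-- what changed: Replaced the triple nested scan with a non-emptiness guard plus set-based checks: membership intersections for the three equality cases and pairwise-sum membership tests against the third set.
import Mathlib
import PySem

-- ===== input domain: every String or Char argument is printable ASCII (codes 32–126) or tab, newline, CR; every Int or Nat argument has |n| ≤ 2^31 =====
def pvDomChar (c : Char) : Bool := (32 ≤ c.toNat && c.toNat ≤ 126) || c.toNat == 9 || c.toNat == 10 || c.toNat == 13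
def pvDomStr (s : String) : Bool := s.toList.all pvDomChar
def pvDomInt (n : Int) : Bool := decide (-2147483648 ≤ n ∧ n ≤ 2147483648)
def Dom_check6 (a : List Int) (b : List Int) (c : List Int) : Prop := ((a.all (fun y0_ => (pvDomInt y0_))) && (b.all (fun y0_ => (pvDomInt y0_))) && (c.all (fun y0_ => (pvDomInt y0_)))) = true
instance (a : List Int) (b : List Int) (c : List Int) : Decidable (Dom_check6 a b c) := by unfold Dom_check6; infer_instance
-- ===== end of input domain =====

-- B replaces A's triple nested scan by a non-emptiness guard plus set-based pairwise checks (objective: alternative).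

-- ===== PORT A =====
-- innermost loop: for k in c
def check6LoopC (i j : Int) (c : List Int) : Option Bool :=
  match c with
  | [] => none
  | k :: rest =>
    if i == j || i == k || j == k then some true
    else if i == j + k || j == i + k || k == i + j then some true
    else check6LoopC i j rest

-- middle loop: for j in b
def check6LoopB (i : Int) (b : List Int) (c : List Int) : Option Bool :=
  match b with
  | [] => none
  | j :: rest =>
    match check6LoopC i j c with
    | some r => some r
    | none => check6LoopB i rest c

def check6 (a : List Int) (b : List Int) (c : List Int) : Option Bool :=
  match a with
  | [] => none
  | i :: rest =>
    match check6LoopB i b c with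
    | some r => some r
    | none => check6 rest b c

-- ===== PORT B =====
def check6_alt (a : List Int) (b : List Int) (c : List Int) : Option Bool :=
  if a.isEmpty || b.isEmpty || c.isEmpty then none
  else
    let sa : PySem.Set Int := PySem.Set.ofList a
    let sb : PySem.Set Int := PySem.Set.ofList b
    let sc : PySem.Set Int := PySem.Set.ofList c
    if sa.any (fun x => PySem.Set.contains sb x || PySem.Set.contains sc x)
        || sb.any (fun x => PySem.Set.contains sc x) then some true
    else if sb.any (fun j => sc.any (fun k => PySem.Set.contains sa (j + k))) then some true
    else if sa.any (fun i => sc.any (fun k => PySem.Set.contains sb (i + k))) then some true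
    else if sa.any (fun i => sb.any (fun j => PySem.Set.contains sc (i + j))) then some true
    else none

-- ===== PRECONDITION & SPEC =====
def Spec_check6 (a : List Int) (b : List Int) (c : List Int) (out : Option Bool) : Prop := out = check6_alt a b c
instance (a : List Int) (b : List Int) (c : List Int) (out : Option Bool) : Decidable (Spec_check6 a b c out) := by unfold Spec_check6; infer_instance

-- ===== CLAIM (what is proved, stated in full; the proofs are below) =====
def Claim_equal_check6 : Prop := ∀ (a : List Int) (b : List Int) (c : List Int), Dom_check6 a b c → Spec_check6 a b c (check6 a b c)

-- ===== LEMMAS AND PROOFS =====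
def pvCond (i j k : Int) : Bool :=
  (i == j || i == k || j == k) || (i == j + k || j == i + k || k == i + j)

def pvAnyTriple (a b c : List Int) : Bool :=
  a.any fun i => b.any fun j => c.any fun k => pvCond i j k

theorem check6LoopC_eq (i j : Int) (c : List Int) :
    check6LoopC i j c = if c.any (fun k => pvCond i j k) then some true else none := by
  induction c with
  | nil => rfl
  | cons k rest ih =>
    simp only [check6LoopC, List.any_cons, pvCond]
    by_cases h1 : (i == j || i == k || j == k) = true
    · simp [h1]
    · by_cases h2 : (i == j + k || j == i + k || k == i + j) = true
      · simp [h1, h2]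
      · simp [h1, h2, ih, pvCond]

theorem check6LoopB_eq (i : Int) (b c : List Int) :
    check6LoopB i b c = if b.any (fun j => c.any fun k => pvCond i j k) then some true else none := by
  induction b with
  | nil => rfl
  | cons j rest ih =>
    simp only [check6LoopB, check6LoopC_eq, List.any_cons]
    by_cases h : (c.any fun k => pvCond i j k) = true
    · simp [h]
    · simp [h, ih]

theorem check6_eq (a b c : List Int) :
    check6 a b c = if pvAnyTriple a b c then some true else none := by
  induction a with
  | nil => rfl
  | cons i rest ih =>
    simp only [check6, check6LoopB_eq, pvAnyTriple, List.any_cons]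
    by_cases h : (b.any fun j => c.any fun k => pvCond i j k) = true
    · simp [h]
    · simp [h]; simpa [pvAnyTriple] using ih

theorem pvIfChain (c1 c2 c3 c4 : Bool) :
    (if c1 then some true else if c2 then some true else if c3 then some true
      else if c4 then some true else (none : Option Bool))
    = if c1 || c2 || c3 || c4 then some true else none := by
  cases c1 <;> cases c2 <;> cases c3 <;> cases c4 <;> simp

theorem check6_alt_eq (a b c : List Int) :
    check6_alt a b c = if pvAnyTriple a b c then some true else none := by
  by_cases ha : a = []
  · subst ha; simp [check6_alt, pvAnyTriple]
  by_cases hb : b = []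
  · subst hb; simp [check6_alt, pvAnyTriple]
  by_cases hc : c = []
  · subst hc; simp [check6_alt, pvAnyTriple]
  obtain ⟨a0, ha0⟩ := List.exists_mem_of_ne_nil a ha
  obtain ⟨b0, hb0⟩ := List.exists_mem_of_ne_nil b hb
  obtain ⟨c0, hc0⟩ := List.exists_mem_of_ne_nil c hc
  have hempty : (a.isEmpty || b.isEmpty || c.isEmpty) = false := by simp [ha, hb, hc]
  have key :
      (((PySem.Set.ofList a).any (fun x => PySem.Set.contains (PySem.Set.ofList b) x
            || PySem.Set.contains (PySem.Set.ofList c) x)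
          || (PySem.Set.ofList b).any (fun x => PySem.Set.contains (PySem.Set.ofList c) x))
        || (PySem.Set.ofList b).any (fun j => (PySem.Set.ofList c).any
              (fun k => PySem.Set.contains (PySem.Set.ofList a) (j + k)))
        || (PySem.Set.ofList a).any (fun i => (PySem.Set.ofList c).any
              (fun k => PySem.Set.contains (PySem.Set.ofList b) (i + k)))
        || (PySem.Set.ofList a).any (fun i => (PySem.Set.ofList b).any
              (fun j => PySem.Set.contains (PySem.Set.ofList c) (i + j)))) = pvAnyTriple a b c := by
    rw [Bool.eq_iff_iff]
    simp only [pvAnyTriple, pvCond, List.any_eq_true, Bool.or_eq_true,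
      PySem.Set.contains_iff, PySem.Set.mem_ofList, beq_iff_eq]
    constructor
    · rintro ((((⟨i, hi, (hj | hk)⟩ | ⟨j, hj, hk⟩) | ⟨j, hj, k, hk, hD⟩) | ⟨i, hi, k, hk, hE⟩)
        | ⟨i, hi, j, hj, hF⟩)
      · exact ⟨i, hi, i, hj, c0, hc0, Or.inl (Or.inl (Or.inl rfl))⟩
      · exact ⟨i, hi, b0, hb0, i, hk, Or.inl (Or.inl (Or.inr rfl))⟩
      · exact ⟨a0, ha0, j, hj, j, hk, Or.inl (Or.inr rfl)⟩
      · exact ⟨j + k, hD, j, hj, k, hk, Or.inr (Or.inl (Or.inl rfl))⟩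
      · exact ⟨i, hi, i + k, hE, k, hk, Or.inr (Or.inl (Or.inr rfl))⟩
      · exact ⟨i, hi, j, hj, i + j, hF, Or.inr (Or.inr rfl)⟩
    · rintro ⟨i, hi, j, hj, k, hk, (((h | h) | h) | ((h | h) | h))⟩
      · subst h; exact Or.inl (Or.inl (Or.inl (Or.inl ⟨i, hi, Or.inl hj⟩)))
      · subst h; exact Or.inl (Or.inl (Or.inl (Or.inl ⟨i, hi, Or.inr hk⟩)))
      · subst h; exact Or.inl (Or.inl (Or.inl (Or.inr ⟨j, hj, hk⟩)))
      · subst h; exact Or.inl (Or.inl (Or.inr ⟨j, hj, k, hk, hi⟩))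
      · subst h; exact Or.inl (Or.inr ⟨i, hi, k, hk, hj⟩)
      · subst h; exact Or.inr ⟨i, hi, j, hj, hk⟩
  simp only [check6_alt, hempty, Bool.false_eq_true, if_false]
  rw [pvIfChain, key]

theorem check6_spec : Claim_equal_check6 := by
  intro a b c _
  unfold Spec_check6
  rw [check6_eq, check6_alt_eq]
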